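-- pv_equiv track=rewrite | github.com/marcus-waldman/Iconsult_mcp | scripts/parse_book.py | get_chapter_for_line
-- ===== SOURCE A (Python) =====
-- CONTENT_START_LINE = 985  # Part 1 starts here
--
-- CHAPTERS = [
--     (1, "GenAI in the Enterprise: Landscape, Maturity, and Agent Focus", 1, 3),
--     (2, "Agent-Ready LLMs: Selection, Deployment, and Adaptation", 1, 25),
--     (3, "The Spectrum of LLM Adaptation for Agents: RAG to Fine-tuning", 1, 57),
--     (4, "Agentic AI Architecture: Components and Interactions", 2, 95),
--     (5, "Multi-Agent Coordination Patterns", 2, 119),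
--     (6, "Explainability and Compliance Agentic Patterns", 2, 183),
--     (7, "Robustness and Fault Tolerance Patterns", 2, 205),
--     (8, "Security and Trust Patterns for AI Agents", 2, 245),
--     (9, "Human-Agent Interaction Patterns", 2, 281),
--     (10, "Agent Cognition and Memory Patterns", 2, 311),
--     (11, "System-Level Patterns and Inter-Agent Communication", 2, 339),
--     (12, "Self-Improvement and Evaluation Patterns", 3, 367),
--     (13, "Implementing a Foundational Agentic System with Google ADK", 3, 407),
--     (14, "Implementing a Multi-Agent Architecture with CrewAI and LangGraph", 3, 467),
--     (15, "From Blueprints to Impact: Practical Deployment and Measuring Value", 3, 507),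
--     (16, "The Future of Agentic AI", 3, 519),
-- ]
--
-- CHAPTER_LINES = {
--     1: 996, 2: 1415, 3: 2018, 4: 2806, 5: 3262, 6: 4807,
--     7: 5342, 8: 7338, 9: 8049, 10: 8775, 11: 9532,
--     12: 10427, 13: 10740, 14: 11483, 15: 12082, 16: 13155,
-- }
--
-- def get_chapter_for_line(line_num: int) -> tuple[int, int] | None:
--     """Given a line number, return (chapter_number, part_number) or None if before content."""
--     if line_num < CONTENT_START_LINE:
--         return None
--
--     current_chapter = None
--     for ch_num, ch_line in sorted(CHAPTER_LINES.items(), key=lambda x: x[1]):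
--         if line_num >= ch_line:
--             current_chapter = ch_num
--         else:
--             break
--
--     if current_chapter is None:
--         return None
--
--     part = next(p for c, _, p, _ in CHAPTERS if c == current_chapter)
--     return current_chapter, part
-- ===== SOURCE B (Python) =====
-- CONTENT_START_LINE = 985  # Part 1 starts here
--
-- CHAPTERS = [
--     (1, "GenAI in the Enterprise: Landscape, Maturity, and Agent Focus", 1, 3),
--     (2, "Agent-Ready LLMs: Selection, Deployment, and Adaptation", 1, 25),
--     (3, "The Spectrum of LLM Adaptation for Agents: RAG to Fine-tuning", 1, 57),
--     (4, "Agentic AI Architecture: Components and Interactions", 2, 95),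
--     (5, "Multi-Agent Coordination Patterns", 2, 119),
--     (6, "Explainability and Compliance Agentic Patterns", 2, 183),
--     (7, "Robustness and Fault Tolerance Patterns", 2, 205),
--     (8, "Security and Trust Patterns for AI Agents", 2, 245),
--     (9, "Human-Agent Interaction Patterns", 2, 281),
--     (10, "Agent Cognition and Memory Patterns", 2, 311),
--     (11, "System-Level Patterns and Inter-Agent Communication", 2, 339),
--     (12, "Self-Improvement and Evaluation Patterns", 3, 367),
--     (13, "Implementing a Foundational Agentic System with Google ADK", 3, 407),
--     (14, "Implementing a Multi-Agent Architecture with CrewAI and LangGraph", 3, 467),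
--     (15, "From Blueprints to Impact: Practical Deployment and Measuring Value", 3, 507),
--     (16, "The Future of Agentic AI", 3, 519),
-- ]
--
-- CHAPTER_LINES = {
--     1: 996, 2: 1415, 3: 2018, 4: 2806, 5: 3262, 6: 4807,
--     7: 5342, 8: 7338, 9: 8049, 10: 8775, 11: 9532,
--     12: 10427, 13: 10740, 14: 11483, 15: 12082, 16: 13155,
-- }
--
-- # Precomputed once at module level: chapter starts in ascending order, the
-- # chapters in that order, and a chapter -> part lookup table.
-- _SORTED_ITEMS = sorted(CHAPTER_LINES.items(), key=lambda kv: kv[1])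
-- _STARTS = [line for _, line in _SORTED_ITEMS]
-- _CHAPTERS_BY_START = [ch for ch, _ in _SORTED_ITEMS]
-- _PART_OF = {c: p for c, _title, p, _page in CHAPTERS}
--
--
-- def get_chapter_for_line(line_num: int) -> tuple[int, int] | None:
--     """Given a line number, return (chapter_number, part_number) or None if before content."""
--     if line_num < CONTENT_START_LINE:
--         return None
--     # binary search: i = number of chapter starts <= line_num (bisect_right)
--     lo, hi = 0, len(_STARTS)
--     while lo < hi:
--         mid = (lo + hi) // 2
--         if _STARTS[mid] <= line_num:
--             lo = mid + 1
--         else: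
--             hi = mid
--     if lo == 0:
--         return None
--     ch = _CHAPTERS_BY_START[lo - 1]
--     return ch, _PART_OF[ch]
-- ===== Notes on version B (the rewrite author's own statement) =====
-- stated objective: idiomatic
-- what changed: A re-sorts the chapter dict and does a linear scan with break plus a linear next() search over CHAPTERS on every call; B precomputes sorted start/chapter tables and a chapter-to-part dict once at module level and answers each query with a binary search (bisect_right by hand) and one dict lookup.
import Mathlib
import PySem

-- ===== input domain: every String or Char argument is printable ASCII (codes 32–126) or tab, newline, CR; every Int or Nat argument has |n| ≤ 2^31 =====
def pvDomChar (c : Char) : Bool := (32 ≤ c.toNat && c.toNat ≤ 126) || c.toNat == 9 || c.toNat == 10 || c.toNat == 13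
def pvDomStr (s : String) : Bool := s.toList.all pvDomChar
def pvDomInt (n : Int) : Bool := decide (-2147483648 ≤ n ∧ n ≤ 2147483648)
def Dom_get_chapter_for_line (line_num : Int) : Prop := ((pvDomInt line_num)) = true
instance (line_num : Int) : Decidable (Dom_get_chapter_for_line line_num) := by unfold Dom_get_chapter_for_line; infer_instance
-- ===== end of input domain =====

-- B replaces A's per-call sort + linear scan-with-break by module-level precomputed
-- sorted start/chapter/part tables and a hand-written binary search (idiomatic/alternative).

-- ===== PORT A =====
def pvA_CONTENT_START_LINE : Int := 985

def pvA_CHAPTERS : List (Int × String × Int × Int) :=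
  [(1, "GenAI in the Enterprise: Landscape, Maturity, and Agent Focus", 1, 3),
   (2, "Agent-Ready LLMs: Selection, Deployment, and Adaptation", 1, 25),
   (3, "The Spectrum of LLM Adaptation for Agents: RAG to Fine-tuning", 1, 57),
   (4, "Agentic AI Architecture: Components and Interactions", 2, 95),
   (5, "Multi-Agent Coordination Patterns", 2, 119),
   (6, "Explainability and Compliance Agentic Patterns", 2, 183),
   (7, "Robustness and Fault Tolerance Patterns", 2, 205),
   (8, "Security and Trust Patterns for AI Agents", 2, 245),
   (9, "Human-Agent Interaction Patterns", 2, 281),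
   (10, "Agent Cognition and Memory Patterns", 2, 311),
   (11, "System-Level Patterns and Inter-Agent Communication", 2, 339),
   (12, "Self-Improvement and Evaluation Patterns", 3, 367),
   (13, "Implementing a Foundational Agentic System with Google ADK", 3, 407),
   (14, "Implementing a Multi-Agent Architecture with CrewAI and LangGraph", 3, 467),
   (15, "From Blueprints to Impact: Practical Deployment and Measuring Value", 3, 507),
   (16, "The Future of Agentic AI", 3, 519)]

def pvA_CHAPTER_LINES : PySem.Dict Int Int :=
  PySem.Dict.ofList
    [(1, 996), (2, 1415), (3, 2018), (4, 2806), (5, 3262), (6, 4807),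
     (7, 5342), (8, 7338), (9, 8049), (10, 8775), (11, 9532),
     (12, 10427), (13, 10740), (14, 11483), (15, 12082), (16, 13155)]

-- the for-loop with break: walks the sorted items, updating current_chapter, stops at first ch_line > line_num
def pvA_loop (line_num : Int) : List (Int × Int) → Option Int → Option Int
  | [], cur => cur
  | (ch_num, ch_line) :: rest, cur =>
      if line_num ≥ ch_line then pvA_loop line_num rest (some ch_num) else cur

def get_chapter_for_line (line_num : Int) : Option (Int × Int) :=
  if line_num < pvA_CONTENT_START_LINE then none
  else
    match pvA_loop line_num (PySem.List.sorted pvA_CHAPTER_LINES.items (fun x => x.2) false) none with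
    | none => none
    | some current_chapter =>
        -- next(p for c, _, p, _ in CHAPTERS if c == current_chapter); the generator always
        -- matches here, so the StopIteration path is unreachable (ported as the none branch)
        match (pvA_CHAPTERS.find? (fun t => t.1 == current_chapter)).map (fun t => t.2.2.1) with
        | some part => some (current_chapter, part)
        | none => none

-- ===== PORT B =====
def pvB_STARTS : List Int :=
  [996, 1415, 2018, 2806, 3262, 4807, 5342, 7338, 8049, 8775, 9532, 10427, 10740, 11483, 12082, 13155]

def pvB_CHAPTERS_BY_START : List Int :=
  [1, 2, 3, 4, 5, 6, 7, 8, 9, 10, 11, 12, 13, 14, 15, 16]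

def pvB_PART_OF : PySem.Dict Int Int :=
  PySem.Dict.ofList
    [(1, 1), (2, 1), (3, 1), (4, 2), (5, 2), (6, 2), (7, 2), (8, 2), (9, 2), (10, 2),
     (11, 2), (12, 3), (13, 3), (14, 3), (15, 3), (16, 3)]

-- Source B's hand-written bisect_right loop; list indexing is always in range here (getD 0)
def pvB_bisect (line_num : Int) (lo hi : Nat) : Nat :=
  if lo < hi then
    let mid := (lo + hi) / 2
    if pvB_STARTS.getD mid 0 ≤ line_num then pvB_bisect line_num (mid + 1) hi
    else pvB_bisect line_num lo mid
  else lo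
termination_by hi - lo
decreasing_by all_goals omega

def get_chapter_for_line_alt (line_num : Int) : Option (Int × Int) :=
  if line_num < 985 then none
  else
    let i := pvB_bisect line_num 0 pvB_STARTS.length
    if i = 0 then none
    else
      let ch := pvB_CHAPTERS_BY_START.getD (i - 1) 0
      some (ch, pvB_PART_OF.getD ch 0)

-- ===== PRECONDITION & SPEC =====
def Spec_get_chapter_for_line (line_num : Int) (out : Option (Int × Int)) : Prop := out = get_chapter_for_line_alt line_num
instance (line_num : Int) (out : Option (Int × Int)) : Decidable (Spec_get_chapter_for_line line_num out) := by unfold Spec_get_chapter_for_line; infer_instance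

-- ===== CLAIM (what is proved, stated in full; the proofs are below) =====
def Claim_equal_get_chapter_for_line : Prop := ∀ (line_num : Int), Dom_get_chapter_for_line line_num → Spec_get_chapter_for_line line_num (get_chapter_for_line line_num)

-- ===== LEMMAS AND PROOFS =====
lemma pv_sorted_items_eval :
    PySem.List.sorted pvA_CHAPTER_LINES.items (fun x => x.2) false =
    [(1, 996), (2, 1415), (3, 2018), (4, 2806), (5, 3262), (6, 4807),
     (7, 5342), (8, 7338), (9, 8049), (10, 8775), (11, 9532),
     (12, 10427), (13, 10740), (14, 11483), (15, 12082), (16, 13155)] := by decide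

-- ===== VERDICT (by name: the statement is the Claim_ definition above) =====
theorem get_chapter_for_line_spec : Claim_equal_get_chapter_for_line := by
  intro n _
  unfold Spec_get_chapter_for_line get_chapter_for_line get_chapter_for_line_alt
  rw [pv_sorted_items_eval]
  by_cases h : n < 985
  · simp [h, pvA_CONTENT_START_LINE]
  · simp only [pvA_CONTENT_START_LINE, h, if_false]
    by_cases h0 : n < 996
    · simp [pvA_loop, pvB_bisect, pvB_STARTS, pvB_CHAPTERS_BY_START, pvA_CHAPTERS, pvB_PART_OF, show ¬((996:Int) ≤ n) by omega, show ¬((1415:Int) ≤ n) by omega, show ¬((2018:Int) ≤ n) by omega, show ¬((2806:Int) ≤ n) by omega, show ¬((3262:Int) ≤ n) by omega, show ¬((4807:Int) ≤ n) by omega, show ¬((5342:Int) ≤ n) by omega, show ¬((7338:Int) ≤ n) by omega, show ¬((8049:Int) ≤ n) by omega, show ¬((8775:Int) ≤ n) by omega, show ¬((9532:Int) ≤ n) by omega, show ¬((10427:Int) ≤ n) by omega, show ¬((10740:Int) ≤ n) by omega, show ¬((11483:Int) ≤ n) by omega, show ¬((12082:Int) ≤ n) by omega, show ¬((13155:Int)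 ≤ n) by omega]
      all_goals decide
    by_cases h1 : n < 1415
    · simp [pvA_loop, pvB_bisect, pvB_STARTS, pvB_CHAPTERS_BY_START, pvA_CHAPTERS, pvB_PART_OF, show ((996:Int) ≤ n) by omega, show ¬((1415:Int) ≤ n) by omega, show ¬((2018:Int) ≤ n) by omega, show ¬((2806:Int) ≤ n) by omega, show ¬((3262:Int) ≤ n) by omega, show ¬((4807:Int) ≤ n) by omega, show ¬((5342:Int) ≤ n) by omega, show ¬((7338:Int) ≤ n) by omega, show ¬((8049:Int) ≤ n) by omega, show ¬((8775:Int) ≤ n) by omega, show ¬((9532:Int) ≤ n) by omega, show ¬((10427:Int) ≤ n) by omega, show ¬((10740:Int) ≤ n) by omega, show ¬((11483:Int) ≤ n) by omega, show ¬((12082:Int) ≤ n) by omega, show ¬((13155:Int) ≤ n) by omega]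
      all_goals decide
    by_cases h2 : n < 2018
    · simp [pvA_loop, pvB_bisect, pvB_STARTS, pvB_CHAPTERS_BY_START, pvA_CHAPTERS, pvB_PART_OF, show ((996:Int) ≤ n) by omega, show ((1415:Int) ≤ n) by omega, show ¬((2018:Int) ≤ n) by omega, show ¬((2806:Int) ≤ n) by omega, show ¬((3262:Int) ≤ n) by omega, show ¬((4807:Int) ≤ n) by omega, show ¬((5342:Int) ≤ n) by omega, show ¬((7338:Int) ≤ n) by omega, show ¬((8049:Int) ≤ n) by omega, show ¬((8775:Int) ≤ n) by omega, show ¬((9532:Int) ≤ n) by omega, show ¬((10427:Int) ≤ n) by omega, show ¬((10740:Int) ≤ n) by omega, show ¬((11483:Int) ≤ n) by omega, show ¬((12082:Int) ≤ n) by omega, show ¬((13155:Int) ≤ n) by omega]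
      all_goals decide
    by_cases h3 : n < 2806
    · simp [pvA_loop, pvB_bisect, pvB_STARTS, pvB_CHAPTERS_BY_START, pvA_CHAPTERS, pvB_PART_OF, show ((996:Int) ≤ n) by omega, show ((1415:Int) ≤ n) by omega, show ((2018:Int) ≤ n) by omega, show ¬((2806:Int) ≤ n) by omega, show ¬((3262:Int) ≤ n) by omega, show ¬((4807:Int) ≤ n) by omega, show ¬((5342:Int) ≤ n) by omega, show ¬((7338:Int) ≤ n) by omega, show ¬((8049:Int) ≤ n) by omega, show ¬((8775:Int) ≤ n) by omega, show ¬((9532:Int) ≤ n) by omega, show ¬((10427:Int) ≤ n) by omega, show ¬((10740:Int) ≤ n) by omega, show ¬((11483:Int) ≤ n) by omega, show ¬((12082:Int) ≤ n) by omega, show ¬((13155:Int) ≤ n) by omega]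
      all_goals decide
    by_cases h4 : n < 3262
    · simp [pvA_loop, pvB_bisect, pvB_STARTS, pvB_CHAPTERS_BY_START, pvA_CHAPTERS, pvB_PART_OF, show ((996:Int) ≤ n) by omega, show ((1415:Int) ≤ n) by omega, show ((2018:Int) ≤ n) by omega, show ((2806:Int) ≤ n) by omega, show ¬((3262:Int) ≤ n) by omega, show ¬((4807:Int) ≤ n) by omega, show ¬((5342:Int) ≤ n) by omega, show ¬((7338:Int) ≤ n) by omega, show ¬((8049:Int) ≤ n) by omega, show ¬((8775:Int) ≤ n) by omega, show ¬((9532:Int) ≤ n) by omega, show ¬((10427:Int) ≤ n) by omega, show ¬((10740:Int) ≤ n) by omega, show ¬((11483:Int) ≤ n) by omega, show ¬((12082:Int) ≤ n) by omega, show ¬((13155:Int) ≤ n) by omega]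
      all_goals decide
    by_cases h5 : n < 4807
    · simp [pvA_loop, pvB_bisect, pvB_STARTS, pvB_CHAPTERS_BY_START, pvA_CHAPTERS, pvB_PART_OF, show ((996:Int) ≤ n) by omega, show ((1415:Int) ≤ n) by omega, show ((2018:Int) ≤ n) by omega, show ((2806:Int) ≤ n) by omega, show ((3262:Int) ≤ n) by omega, show ¬((4807:Int) ≤ n) by omega, show ¬((5342:Int) ≤ n) by omega, show ¬((7338:Int) ≤ n) by omega, show ¬((8049:Int) ≤ n) by omega, show ¬((8775:Int) ≤ n) by omega, show ¬((9532:Int) ≤ n) by omega, show ¬((10427:Int) ≤ n) by omega, show ¬((10740:Int) ≤ n) by omega, show ¬((11483:Int) ≤ n) by omega, show ¬((12082:Int) ≤ n) by omega, show ¬((13155:Int) ≤ n) by omega]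
      all_goals decide
    by_cases h6 : n < 5342
    · simp [pvA_loop, pvB_bisect, pvB_STARTS, pvB_CHAPTERS_BY_START, pvA_CHAPTERS, pvB_PART_OF, show ((996:Int) ≤ n) by omega, show ((1415:Int) ≤ n) by omega, show ((2018:Int) ≤ n) by omega, show ((2806:Int) ≤ n) by omega, show ((3262:Int) ≤ n) by omega, show ((4807:Int) ≤ n) by omega, show ¬((5342:Int) ≤ n) by omega, show ¬((7338:Int) ≤ n) by omega, show ¬((8049:Int) ≤ n) by omega, show ¬((8775:Int) ≤ n) by omega, show ¬((9532:Int) ≤ n) by omega, show ¬((10427:Int) ≤ n) by omega, show ¬((10740:Int) ≤ n) by omega, show ¬((11483:Int) ≤ n) by omega, show ¬((12082:Int) ≤ n) by omega, show ¬((13155:Int) ≤ n) by omega]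
      all_goals decide
    by_cases h7 : n < 7338
    · simp [pvA_loop, pvB_bisect, pvB_STARTS, pvB_CHAPTERS_BY_START, pvA_CHAPTERS, pvB_PART_OF, show ((996:Int) ≤ n) by omega, show ((1415:Int) ≤ n) by omega, show ((2018:Int) ≤ n) by omega, show ((2806:Int) ≤ n) by omega, show ((3262:Int) ≤ n) by omega, show ((4807:Int) ≤ n) by omega, show ((5342:Int) ≤ n) by omega, show ¬((7338:Int) ≤ n) by omega, show ¬((8049:Int) ≤ n) by omega, show ¬((8775:Int) ≤ n) by omega, show ¬((9532:Int) ≤ n) by omega, show ¬((10427:Int) ≤ n) by omega, show ¬((10740:Int) ≤ n) by omega, show ¬((11483:Int) ≤ n) by omega, show ¬((12082:Int) ≤ n) by omega, show ¬((13155:Int) ≤ n) by omega]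
      all_goals decide
    by_cases h8 : n < 8049
    · simp [pvA_loop, pvB_bisect, pvB_STARTS, pvB_CHAPTERS_BY_START, pvA_CHAPTERS, pvB_PART_OF, show ((996:Int) ≤ n) by omega, show ((1415:Int) ≤ n) by omega, show ((2018:Int) ≤ n) by omega, show ((2806:Int) ≤ n) by omega, show ((3262:Int) ≤ n) by omega, show ((4807:Int) ≤ n) by omega, show ((5342:Int) ≤ n) by omega, show ((7338:Int) ≤ n) by omega, show ¬((8049:Int) ≤ n) by omega, show ¬((8775:Int) ≤ n) by omega, show ¬((9532:Int) ≤ n) by omega, show ¬((10427:Int) ≤ n) by omega, show ¬((10740:Int) ≤ n) by omega, show ¬((11483:Int) ≤ n) by omega, show ¬((12082:Int) ≤ n) by omega, show ¬((13155:Int) ≤ n) by omega]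
      all_goals decide
    by_cases h9 : n < 8775
    · simp [pvA_loop, pvB_bisect, pvB_STARTS, pvB_CHAPTERS_BY_START, pvA_CHAPTERS, pvB_PART_OF, show ((996:Int) ≤ n) by omega, show ((1415:Int) ≤ n) by omega, show ((2018:Int) ≤ n) by omega, show ((2806:Int) ≤ n) by omega, show ((3262:Int) ≤ n) by omega, show ((4807:Int) ≤ n) by omega, show ((5342:Int) ≤ n) by omega, show ((7338:Int) ≤ n) by omega, show ((8049:Int) ≤ n) by omega, show ¬((8775:Int) ≤ n) by omega, show ¬((9532:Int) ≤ n) by omega, show ¬((10427:Int) ≤ n) by omega, show ¬((10740:Int) ≤ n) by omega, show ¬((11483:Int) ≤ n) by omega, show ¬((12082:Int) ≤ n) by omega, show ¬((13155:Int) ≤ n) by omega]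
      all_goals decide
    by_cases h10 : n < 9532
    · simp [pvA_loop, pvB_bisect, pvB_STARTS, pvB_CHAPTERS_BY_START, pvA_CHAPTERS, pvB_PART_OF, show ((996:Int) ≤ n) by omega, show ((1415:Int) ≤ n) by omega, show ((2018:Int) ≤ n) by omega, show ((2806:Int) ≤ n) by omega, show ((3262:Int) ≤ n) by omega, show ((4807:Int) ≤ n) by omega, show ((5342:Int) ≤ n) by omega, show ((7338:Int) ≤ n) by omega, show ((8049:Int) ≤ n) by omega, show ((8775:Int) ≤ n) by omega, show ¬((9532:Int) ≤ n) by omega, show ¬((10427:Int) ≤ n) by omega, show ¬((10740:Int) ≤ n) by omega, show ¬((11483:Int) ≤ n) by omega, show ¬((12082:Int) ≤ n) by omega, show ¬((13155:Int) ≤ n) by omega]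
      all_goals decide
    by_cases h11 : n < 10427
    · simp [pvA_loop, pvB_bisect, pvB_STARTS, pvB_CHAPTERS_BY_START, pvA_CHAPTERS, pvB_PART_OF, show ((996:Int) ≤ n) by omega, show ((1415:Int) ≤ n) by omega, show ((2018:Int) ≤ n) by omega, show ((2806:Int) ≤ n) by omega, show ((3262:Int) ≤ n) by omega, show ((4807:Int) ≤ n) by omega, show ((5342:Int) ≤ n) by omega, show ((7338:Int) ≤ n) by omega, show ((8049:Int) ≤ n) by omega, show ((8775:Int) ≤ n) by omega, show ((9532:Int) ≤ n) by omega, show ¬((10427:Int) ≤ n) by omega, show ¬((10740:Int) ≤ n) by omega, show ¬((11483:Int) ≤ n) by omega, show ¬((12082:Int) ≤ n) by omega, show ¬((13155:Int) ≤ n) by omega]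
      all_goals decide
    by_cases h12 : n < 10740
    · simp [pvA_loop, pvB_bisect, pvB_STARTS, pvB_CHAPTERS_BY_START, pvA_CHAPTERS, pvB_PART_OF, show ((996:Int) ≤ n) by omega, show ((1415:Int) ≤ n) by omega, show ((2018:Int) ≤ n) by omega, show ((2806:Int) ≤ n) by omega, show ((3262:Int) ≤ n) by omega, show ((4807:Int) ≤ n) by omega, show ((5342:Int) ≤ n) by omega, show ((7338:Int) ≤ n) by omega, show ((8049:Int) ≤ n) by omega, show ((8775:Int) ≤ n) by omega, show ((9532:Int) ≤ n) by omega, show ((10427:Int) ≤ n) by omega, show ¬((10740:Int) ≤ n) by omega, show ¬((11483:Int) ≤ n) by omega, show ¬((12082:Int) ≤ n) by omega, show ¬((13155:Int) ≤ n) by omega]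
      all_goals decide
    by_cases h13 : n < 11483
    · simp [pvA_loop, pvB_bisect, pvB_STARTS, pvB_CHAPTERS_BY_START, pvA_CHAPTERS, pvB_PART_OF, show ((996:Int) ≤ n) by omega, show ((1415:Int) ≤ n) by omega, show ((2018:Int) ≤ n) by omega, show ((2806:Int) ≤ n) by omega, show ((3262:Int) ≤ n) by omega, show ((4807:Int) ≤ n) by omega, show ((5342:Int) ≤ n) by omega, show ((7338:Int) ≤ n) by omega, show ((8049:Int) ≤ n) by omega, show ((8775:Int) ≤ n) by omega, show ((9532:Int) ≤ n) by omega, show ((10427:Int) ≤ n) by omega, show ((10740:Int) ≤ n) by omega, show ¬((11483:Int) ≤ n) by omega, show ¬((12082:Int) ≤ n) by omega, show ¬((13155:Int) ≤ n) by omega]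
      all_goals decide
    by_cases h14 : n < 12082
    · simp [pvA_loop, pvB_bisect, pvB_STARTS, pvB_CHAPTERS_BY_START, pvA_CHAPTERS, pvB_PART_OF, show ((996:Int) ≤ n) by omega, show ((1415:Int) ≤ n) by omega, show ((2018:Int) ≤ n) by omega, show ((2806:Int) ≤ n) by omega, show ((3262:Int) ≤ n) by omega, show ((4807:Int) ≤ n) by omega, show ((5342:Int) ≤ n) by omega, show ((7338:Int) ≤ n) by omega, show ((8049:Int) ≤ n) by omega, show ((8775:Int) ≤ n) by omega, show ((9532:Int) ≤ n) by omega, show ((10427:Int) ≤ n) by omega, show ((10740:Int) ≤ n) by omega, show ((11483:Int) ≤ n) by omega, show ¬((12082:Int) ≤ n) by omega, show ¬((13155:Int) ≤ n) by omega]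
      all_goals decide
    by_cases h15 : n < 13155
    · simp [pvA_loop, pvB_bisect, pvB_STARTS, pvB_CHAPTERS_BY_START, pvA_CHAPTERS, pvB_PART_OF, show ((996:Int) ≤ n) by omega, show ((1415:Int) ≤ n) by omega, show ((2018:Int) ≤ n) by omega, show ((2806:Int) ≤ n) by omega, show ((3262:Int) ≤ n) by omega, show ((4807:Int) ≤ n) by omega, show ((5342:Int) ≤ n) by omega, show ((7338:Int) ≤ n) by omega, show ((8049:Int) ≤ n) by omega, show ((8775:Int) ≤ n) by omega, show ((9532:Int) ≤ n) by omega, show ((10427:Int) ≤ n) by omega, show ((10740:Int) ≤ n) by omega, show ((11483:Int) ≤ n) by omega, show ((12082:Int) ≤ n) by omega, show ¬((13155:Int) ≤ n) by omega]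
      all_goals decide
    simp [pvA_loop, pvB_bisect, pvB_STARTS, pvB_CHAPTERS_BY_START, pvA_CHAPTERS, pvB_PART_OF, show ((996:Int) ≤ n) by omega, show ((1415:Int) ≤ n) by omega, show ((2018:Int) ≤ n) by omega, show ((2806:Int) ≤ n) by omega, show ((3262:Int) ≤ n) by omega, show ((4807:Int) ≤ n) by omega, show ((5342:Int) ≤ n) by omega, show ((7338:Int) ≤ n) by omega, show ((8049:Int) ≤ n) by omega, show ((8775:Int) ≤ n) by omega, show ((9532:Int) ≤ n) by omega, show ((10427:Int) ≤ n) by omega, show ((10740:Int) ≤ n) by omega, show ((11483:Int) ≤ n) by omega, show ((12082:Int) ≤ n) by omega, show ((13155:Int) ≤ n) by omega]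
    all_goals decide
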